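-- pv_equiv track=rewrite | github.com/Sumedha-ds/practice | app/services/audio.py | number_to_hindi_words
-- ===== SOURCE A (Python) =====
-- def number_to_hindi_words(number: int) -> str:
--     """Convert a number to Hindi words."""
--     ones = ["", "एक", "दो", "तीन", "चार", "पांच", "छह", "सात", "आठ", "नौ"]
--     teens = [
--         "दस",
--         "ग्यारह",
--         "बारह",
--         "तेरह",
--         "चौदह",
--         "पंद्रह",
--         "सोलह",
--         "सत्रह",
--         "अठारह",
--         "उन्नीस",
--     ]
--     tens_words = ["", "", "बीस", "तीस", "चालीस", "पचास", "साठ", "सत्तर", "अस्सी", "नब्बे"]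
--
--     twenties = {
--         21: "इक्कीस",
--         22: "बाईस",
--         23: "तेईस",
--         24: "चौबीस",
--         25: "पच्चीस",
--         26: "छब्बीस",
--         27: "सत्ताईस",
--         28: "अट्ठाईस",
--         29: "उनतीस",
--     }
--
--     if number == 0:
--         return "शून्य"
--
--     if number < 10:
--         return ones[number]
--     if number < 20:
--         return teens[number - 10]
--     if 21 <= number <= 29:
--         return twenties[number]
--     if number < 100:
--         tens_digit = number // 10
--         ones_digit = number % 10
--         if ones_digit == 0:
--             return tens_words[tens_digit]
--         return tens_words[tens_digit] + " " + ones[ones_digit]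
--     if number < 1000:
--         hundreds_digit = number // 100
--         remainder = number % 100
--         if remainder == 0:
--             if hundreds_digit == 1:
--                 return "एक सौ"
--             return ones[hundreds_digit] + " सौ"
--         if hundreds_digit == 1:
--             return "एक सौ " + number_to_hindi_words(remainder)
--         return ones[hundreds_digit] + " सौ " + number_to_hindi_words(remainder)
--     if number < 100000:
--         thousands = number // 1000
--         remainder = number % 1000
--         if remainder == 0:
--             if thousands == 1:
--                 return "एक हज़ार"
--             if thousands < 10:
--                 return ones[thousands] + " हज़ार"
--             return number_to_hindi_words(thousands) + " हज़ार"
--         if thousands == 1: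
--             return "एक हज़ार " + number_to_hindi_words(remainder)
--         if thousands < 10:
--             return ones[thousands] + " हज़ार " + number_to_hindi_words(remainder)
--         return number_to_hindi_words(thousands) + " हज़ार " + number_to_hindi_words(remainder)
--     return str(number)
-- ===== SOURCE B (Python) =====
-- def number_to_hindi_words(number: int) -> str:
--     """Convert a number to Hindi words."""
--     if number == 0:
--         return "शून्य"
--     if number < 0 or number >= 100000:
--         return str(number)
--
--     ones = ["", "एक", "दो", "तीन", "चार", "पांच", "छह", "सात", "आठ", "नौ"]
--     teens = ["दस", "ग्यारह", "बारह", "तेरह", "चौदह", "पंद्रह", "सोलह", "सत्रह", "अठारह", "उन्नीस"]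
--     tens_words = ["", "", "बीस", "तीस", "चालीस", "पचास", "साठ", "सत्तर", "अस्सी", "नब्बे"]
--     special = {21: "इक्कीस", 22: "बाईस", 23: "तेईस", 24: "चौबीस", 25: "पच्चीस",
--                26: "छब्बीस", 27: "सत्ताईस", 28: "अट्ठाईस", 29: "उनतीस"}
--
--     def word_under_100(n: int) -> str:
--         if n < 10:
--             return ones[n]
--         if n < 20:
--             return teens[n - 10]
--         if n in special:
--             return special[n]
--         if n % 10 == 0:
--             return tens_words[n // 10]
--         return tens_words[n // 10] + " " + ones[n % 10]
--
--     # Precompute every word for 0..99 once, in an indexed table.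
--     words = [word_under_100(n) for n in range(100)]
--
--     # Peel off digit groups iteratively, collecting parts.
--     parts = []
--     for divisor, unit in ((1000, "हज़ार"), (100, "सौ")):
--         group, number = divmod(number, divisor)
--         if group:
--             parts.append(words[group] + " " + unit)
--     if number:
--         parts.append(words[number])
--     return " ".join(parts)
-- ===== Notes on version B (the rewrite author's own statement) =====
-- stated objective: alternative
-- what changed: A's recursive branch cascade with per-magnitude special cases is replaced by a precomputed indexed table of all 0-99 words built once by a loop, plus an iterative divisor loop ((1000,'हज़ार'),(100,'सौ')) that peels digit groups, collects parts in a list and ' '.join-s them; no recursion and no per-case word branches remain in the main path.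
-- intended difference: On -10 <= number <= -1 A returns Python negative-index wraparound words (e.g. 'नौ' for -1, '' for -10); B returns str(number), the intended fallback A itself uses for out-of-range inputs >= 100000. — e.g. on number_to_hindi_words(-1): A returns "नौ", B returns "-1"
import Mathlib
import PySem

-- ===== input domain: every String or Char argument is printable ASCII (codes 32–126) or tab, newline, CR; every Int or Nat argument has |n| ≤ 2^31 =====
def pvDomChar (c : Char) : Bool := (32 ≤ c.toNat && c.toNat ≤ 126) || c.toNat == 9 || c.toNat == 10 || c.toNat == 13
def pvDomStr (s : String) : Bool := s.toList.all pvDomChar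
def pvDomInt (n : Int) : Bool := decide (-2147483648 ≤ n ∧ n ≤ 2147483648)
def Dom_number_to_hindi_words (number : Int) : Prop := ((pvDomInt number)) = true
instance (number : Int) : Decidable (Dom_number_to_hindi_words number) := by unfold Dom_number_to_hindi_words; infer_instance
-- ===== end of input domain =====

-- B replaces A's recursive branch cascade by a precomputed 0–99 word table plus an iterative
-- digit-group loop that collects parts and joins them; objective: alternative decomposition.
-- On -10 ≤ number ≤ -1 A returns negative-index wraparound words; B returns str(number) (see D_).


-- ===== PORT A =====
-- A's local list/dict literals, lifted to top-level constants (same values, same order).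
def pvA_ones : List String := ["", "एक", "दो", "तीन", "चार", "पांच", "छह", "सात", "आठ", "नौ"]
def pvA_teens : List String :=
  ["दस", "ग्यारह", "बारह", "तेरह", "चौदह", "पंद्रह", "सोलह", "सत्रह", "अठारह", "उन्नीस"]
def pvA_tens : List String := ["", "", "बीस", "तीस", "चालीस", "पचास", "साठ", "सत्तर", "अस्सी", "नब्बे"]
def pvA_twenties : PySem.Dict Int String :=
  PySem.Dict.ofList
    [(21, "इक्कीस"), (22, "बाईस"), (23, "तेईस"), (24, "चौबीस"), (25, "पच्चीस"),
     (26, "छब्बीस"), (27, "सत्ताईस"), (28, "अट्ठाईस"), (29, "उनतीस")]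

-- Literal port of A.  xs[i] → (PySem.List.pyGet? xs i).getD "" : the `none` case is an IndexError,
-- excluded by Pre_; ditto the dict lookup, whose key is always present in its branch.
def number_to_hindi_words (number : Int) : String :=
  if number = 0 then "शून्य"
  else if number < 10 then (PySem.List.pyGet? pvA_ones number).getD ""
  else if number < 20 then (PySem.List.pyGet? pvA_teens (number - 10)).getD ""
  else if 21 ≤ number ∧ number ≤ 29 then (PySem.Dict.get? pvA_twenties number).getD ""
  else if number < 100 then
    if PySem.Int.mod number 10 = 0 then
      (PySem.List.pyGet? pvA_tens (PySem.Int.floordiv number 10)).getD ""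
    else
      (PySem.List.pyGet? pvA_tens (PySem.Int.floordiv number 10)).getD "" ++ " " ++
        (PySem.List.pyGet? pvA_ones (PySem.Int.mod number 10)).getD ""
  else if number < 1000 then
    if PySem.Int.mod number 100 = 0 then
      if PySem.Int.floordiv number 100 = 1 then "एक सौ"
      else (PySem.List.pyGet? pvA_ones (PySem.Int.floordiv number 100)).getD "" ++ " सौ"
    else
      if PySem.Int.floordiv number 100 = 1 then
        "एक सौ " ++ number_to_hindi_words (PySem.Int.mod number 100)
      else
        (PySem.List.pyGet? pvA_ones (PySem.Int.floordiv number 100)).getD "" ++ " सौ " ++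
          number_to_hindi_words (PySem.Int.mod number 100)
  else if number < 100000 then
    if PySem.Int.mod number 1000 = 0 then
      if PySem.Int.floordiv number 1000 = 1 then "एक हज़ार"
      else if PySem.Int.floordiv number 1000 < 10 then
        (PySem.List.pyGet? pvA_ones (PySem.Int.floordiv number 1000)).getD "" ++ " हज़ार"
      else number_to_hindi_words (PySem.Int.floordiv number 1000) ++ " हज़ार"
    else
      if PySem.Int.floordiv number 1000 = 1 then
        "एक हज़ार " ++ number_to_hindi_words (PySem.Int.mod number 1000)
      else if PySem.Int.floordiv number 1000 < 10 then
        (PySem.List.pyGet? pvA_ones (PySem.Int.floordiv number 1000)).getD "" ++ " हज़ार " ++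
          number_to_hindi_words (PySem.Int.mod number 1000)
      else
        number_to_hindi_words (PySem.Int.floordiv number 1000) ++ " हज़ार " ++
          number_to_hindi_words (PySem.Int.mod number 1000)
  else PySem.Int.toStr number
termination_by number.toNat
decreasing_by
  all_goals
    first
    | (have hm := PySem.Int.mod_nonneg number (b := 100) (by norm_num)
       have hm' := PySem.Int.mod_lt number (b := 100) (by norm_num)
       omega)
    | (have hm := PySem.Int.mod_nonneg number (b := 1000) (by norm_num)
       have hm' := PySem.Int.mod_lt number (b := 1000) (by norm_num)
       omega)
    | (have hd : PySem.Int.floordiv number 1000 < number := by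
         rw [PySem.Int.floordiv_lt_iff_lt_mul (by norm_num)]; nlinarith
       omega)

-- ===== PORT B =====
-- B's local list/dict literals (from Source B).
def pvB_ones : List String := ["", "एक", "दो", "तीन", "चार", "पांच", "छह", "सात", "आठ", "नौ"]
def pvB_teens : List String :=
  ["दस", "ग्यारह", "बारह", "तेरह", "चौदह", "पंद्रह", "सोलह", "सत्रह", "अठारह", "उन्नीस"]
def pvB_tens : List String := ["", "", "बीस", "तीस", "चालीस", "पचास", "साठ", "सत्तर", "अस्सी", "नब्बे"]
def pvB_special : PySem.Dict Int String :=
  PySem.Dict.ofList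
    [(21, "इक्कीस"), (22, "बाईस"), (23, "तेईस"), (24, "चौबीस"), (25, "पच्चीस"),
     (26, "छब्बीस"), (27, "सत्ताईस"), (28, "अट्ठाईस"), (29, "उनतीस")]

-- Source B's word_under_100 helper (its list/dict lookups are always in range where B calls it).
def pvWordOf (n : Int) : String :=
  if n < 10 then (PySem.List.pyGet? pvB_ones n).getD ""
  else if n < 20 then (PySem.List.pyGet? pvB_teens (n - 10)).getD ""
  else if PySem.Dict.contains pvB_special n then (PySem.Dict.get? pvB_special n).getD ""
  else if PySem.Int.mod n 10 = 0 then
    (PySem.List.pyGet? pvB_tens (PySem.Int.floordiv n 10)).getD ""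
  else
    (PySem.List.pyGet? pvB_tens (PySem.Int.floordiv n 10)).getD "" ++ " " ++
      (PySem.List.pyGet? pvB_ones (PySem.Int.mod n 10)).getD ""

-- Source B's 'words = [word_under_100(n) for n in range(100)]'.
def pvWords : List String := (PySem.List.pyRange 0 100 1).map pvWordOf

-- Source B's 'words[i]' lookup (only in-range indices reach it inside B).
def pvWlook (i : Int) : String := PySem.List.pyGetD pvWords i ""

-- Source B's 'for divisor, unit in ((1000, "हज़ार"), (100, "सौ")): group, number = divmod(…); …' loop.
def pvGroups : List (Int × String) → Int → List String → Int × List String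
  | [], num, parts => (num, parts)
  | (d, u) :: rest, num, parts =>
      pvGroups rest (PySem.Int.mod num d)
        (if PySem.Int.floordiv num d ≠ 0 then parts ++ [pvWlook (PySem.Int.floordiv num d) ++ " " ++ u]
         else parts)

-- Port of Source B's main function.
def number_to_hindi_words_alt (number : Int) : String :=
  if number = 0 then "शून्य"
  else if number < 0 ∨ 100000 ≤ number then PySem.Int.toStr number
  else
    let st := pvGroups [(1000, "हज़ार"), (100, "सौ")] number []
    PySem.Str.join " " (if st.1 ≠ 0 then st.2 ++ [pvWlook st.1] else st.2)

-- ===== PRECONDITION & SPEC =====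
-- Pre_ excludes exactly number < -10, where A raises IndexError (ones[number] below the table).
def Pre_number_to_hindi_words (number : Int) : Prop := -10 ≤ number
instance (number : Int) : Decidable (Pre_number_to_hindi_words number) := by
  unfold Pre_number_to_hindi_words; infer_instance
def pvWitness_number_to_hindi_words : Int := 20500

-- On -10 ≤ number ≤ -1, A returns Python negative-index wraparound words (e.g. 'नौ' for -1, '' for
-- -10); B returns str(number), the intended out-of-supported-range fallback A itself uses for
-- number ≥ 100000.
def D_number_to_hindi_words (number : Int) : Prop := -10 ≤ number ∧ number < 0
instance (number : Int) : Decidable (D_number_to_hindi_words number) := by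
  unfold D_number_to_hindi_words; infer_instance

def Spec_number_to_hindi_words (number : Int) (out : String) : Prop :=
  ¬ D_number_to_hindi_words number → out = number_to_hindi_words_alt number
instance (number : Int) (out : String) : Decidable (Spec_number_to_hindi_words number out) := by
  unfold Spec_number_to_hindi_words; infer_instance

def pvDiffWitness_number_to_hindi_words : Int := -1
def pvDiffWitnessOut_number_to_hindi_words : String × String := ("नौ", "-1")

-- ===== CLAIM (what is proved, stated in full; the proofs are below) =====
def Claim_unchanged_number_to_hindi_words : Prop := ∀ (number : Int), Dom_number_to_hindi_words number → Pre_number_to_hindi_words number → Spec_number_to_hindi_words number (number_to_hindi_words number)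
def Claim_changed_number_to_hindi_words : Prop := Dom_number_to_hindi_words (pvDiffWitness_number_to_hindi_words) ∧ Pre_number_to_hindi_words (pvDiffWitness_number_to_hindi_words) ∧ D_number_to_hindi_words (pvDiffWitness_number_to_hindi_words) ∧ number_to_hindi_words (pvDiffWitness_number_to_hindi_words) = pvDiffWitnessOut_number_to_hindi_words.1 ∧ number_to_hindi_words_alt (pvDiffWitness_number_to_hindi_words) = pvDiffWitnessOut_number_to_hindi_words.2 ∧ pvDiffWitnessOut_number_to_hindi_words.1 ≠ pvDiffWitnessOut_number_to_hindi_words.2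
def Claim_exact_number_to_hindi_words : Prop := ∀ (number : Int), Dom_number_to_hindi_words number → Pre_number_to_hindi_words number → D_number_to_hindi_words number → number_to_hindi_words number ≠ number_to_hindi_words_alt number

-- ===== LEMMAS AND PROOFS =====

-- B's table lookup agrees with A on every nonzero two-digit argument.
theorem pv_wget (n : Int) (h1 : 1 ≤ n) (h2 : n < 100) :
    pvWlook n = number_to_hindi_words n := by
  unfold pvWlook pvWords
  rw [PySem.List.pyGetD_map_pyRange_of_nonneg pvWordOf 100 n "" (by omega) (by omega)]
  interval_cases n <;> (rw [number_to_hindi_words.eq_def]; decide)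

-- A on a single nonzero digit is the ones-table entry.
theorem pv_ones_digit (t : Int) (h1 : 1 ≤ t) (h2 : t < 10) :
    number_to_hindi_words t = (PySem.List.pyGet? pvA_ones t).getD "" := by
  interval_cases t <;> (rw [number_to_hindi_words.eq_def]; decide)

-- A's value at 1.
theorem pvA_one : number_to_hindi_words 1 = "एक" := by
  rw [number_to_hindi_words.eq_def]; decide

-- join over a singleton and over a cons with a nonempty tail.
theorem pv_join_one (a : String) : PySem.Str.join " " [a] = a := by
  simp [PySem.Str.join, PySem.Chars.join_singleton]
theorem pv_join_cons (x : String) (rest : List String) (h : rest ≠ []) :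
    PySem.Str.join " " (x :: rest) = x ++ " " ++ PySem.Str.join " " rest := by
  cases rest with
  | nil => exact absurd rfl h
  | cons y t =>
    simp only [PySem.Str.join, List.map_cons]
    rw [show (" " : String).toList = [' '] from rfl]
    rw [PySem.Chars.join_cons_cons, List.append_assoc, String.ofList_append, String.ofList_append]
    rw [String.ofList_toList, show String.ofList [' '] = " " from by decide]
    simp [String.append_assoc]

-- the two if-list shapes produced by B's group loop, rewritten as an append of parts.
theorem pv_list_split {α : Type} (t s w : α) (cG cR : Prop) [Decidable cG] [Decidable cR] :
    (if cR then ((if cG then [t] ++ [s] else [t]) ++ [w]) else (if cG then [t] ++ [s] else [t]))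
      = t :: ((if cG then [s] else []) ++ (if cR then [w] else [])) := by
  by_cases hG : cG <;> by_cases hR : cR <;> simp [hG, hR]
theorem pv_list_split0 {α : Type} (s w : α) (cG cR : Prop) [Decidable cG] [Decidable cR] :
    (if cR then ((if cG then [s] else []) ++ [w]) else (if cG then [s] else []))
      = (if cG then [s] else []) ++ (if cR then [w] else []) := by
  by_cases hG : cG <;> by_cases hR : cR <;> simp [hG, hR]

-- floor-division brackets specialised to this file's divisors.
theorem pv_fd_zero {n b : Int} (h0 : 0 ≤ n) (h : n < b) (hb : 0 < b) :
    PySem.Int.floordiv n b = 0 := by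
  rw [PySem.Int.floordiv_eq_iff_of_pos hb]
  constructor <;> [simpa using h0; simpa using h]
theorem pv_mod_self {n b : Int} (hfd : PySem.Int.floordiv n b = 0) :
    PySem.Int.mod n b = n := by
  have := PySem.Int.floordiv_mul_add_mod n b
  rw [hfd] at this
  simpa using this

-- A on 1..999 equals the join of B's hundreds/units parts.
theorem pv_tail (r : Int) (h1 : 1 ≤ r) (h2 : r < 1000) :
    number_to_hindi_words r =
      PySem.Str.join " "
        ((if PySem.Int.floordiv r 100 ≠ 0 then [pvWlook (PySem.Int.floordiv r 100) ++ " " ++ "सौ"] else []) ++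
         (if PySem.Int.mod r 100 ≠ 0 then [pvWlook (PySem.Int.mod r 100)] else [])) := by
  by_cases hr : r < 100
  · have hfd : PySem.Int.floordiv r 100 = 0 := pv_fd_zero (by omega) hr (by norm_num)
    have hmod : PySem.Int.mod r 100 = r := pv_mod_self hfd
    simp only [hfd, hmod, ne_eq, not_true_eq_false, if_false, show ¬ r = 0 by omega,
      not_false_eq_true, if_true, List.nil_append, pv_join_one]
    exact (pv_wget r h1 hr).symm
  · -- hundreds branch of A
    have hm0 := PySem.Int.mod_nonneg r (b := 100) (by norm_num)
    have hm1 := PySem.Int.mod_lt r (b := 100) (by norm_num)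
    have hd1 : (1:Int) ≤ PySem.Int.floordiv r 100 := by
      rw [PySem.Int.le_floordiv_iff_mul_le (by norm_num)]; omega
    have hd9 : PySem.Int.floordiv r 100 < 10 := by
      rw [PySem.Int.floordiv_lt_iff_lt_mul (by norm_num)]; omega
    have hfd0 : PySem.Int.floordiv r 100 ≠ 0 := by omega
    have hw : pvWlook (PySem.Int.floordiv r 100) =
        number_to_hindi_words (PySem.Int.floordiv r 100) := pv_wget _ (by omega) (by omega)
    have hones := pv_ones_digit (PySem.Int.floordiv r 100) (by omega) hd9
    rw [number_to_hindi_words.eq_def]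
    simp only [show ¬ r = 0 by omega, show ¬ r < 10 by omega, show ¬ r < 20 by omega,
      show ¬ (21 ≤ r ∧ r ≤ 29) by omega, show ¬ r < 100 by omega, h2, if_false, if_true]
    by_cases hr2 : PySem.Int.mod r 100 = 0
    · simp only [hr2, eq_self_iff_true, if_true, ne_eq, not_true, if_false, hfd0,
        not_false_eq_true, List.append_nil, pv_join_one]
      rw [hw]
      by_cases hh : PySem.Int.floordiv r 100 = 1
      · simp only [hh, eq_self_iff_true, if_true]
        rw [pvA_one]
        decide
      · simp only [hh, if_false]
        rw [hones, show (" सौ" : String) = " " ++ "सौ" from by decide]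
        simp only [String.append_assoc]
    · have hwr : pvWlook (PySem.Int.mod r 100) = number_to_hindi_words (PySem.Int.mod r 100) :=
        pv_wget _ (by omega) (by omega)
      simp only [hr2, not_false_eq_true, if_true, ne_eq, hfd0, if_false,
        List.cons_append, List.nil_append]
      rw [pv_join_cons _ _ (List.cons_ne_nil _ _), pv_join_one, hw, hwr]
      by_cases hh : PySem.Int.floordiv r 100 = 1
      · simp only [hh, eq_self_iff_true, if_true]
        rw [pvA_one, show ("एक सौ " : String) = "एक" ++ " " ++ "सौ" ++ " " from by decide]
      · simp only [hh, if_false]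
        rw [hones, show (" सौ " : String) = " " ++ "सौ" ++ " " from by decide]
        simp only [String.append_assoc]

-- The full equality on nonnegative inputs.
theorem pv_main (n : Int) (h0 : 0 ≤ n) :
    number_to_hindi_words n = number_to_hindi_words_alt n := by
  by_cases hz : n = 0
  · subst hz
    unfold number_to_hindi_words_alt
    rw [number_to_hindi_words.eq_def]
    norm_num
  · by_cases hbig : n < 100000
    · -- reduce B to the join of the group-parts list
      unfold number_to_hindi_words_alt
      simp only [hz, if_false, show ¬ (n < 0 ∨ 100000 ≤ n) by omega]
      simp only [pvGroups]
      have hr10 := PySem.Int.mod_nonneg n (b := 1000) (by norm_num)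
      have hr11 := PySem.Int.mod_lt n (b := 1000) (by norm_num)
      by_cases hth : n < 1000
      · have hg1 : PySem.Int.floordiv n 1000 = 0 := pv_fd_zero h0 hth (by norm_num)
        have hmodn : PySem.Int.mod n 1000 = n := pv_mod_self hg1
        simp only [hmodn, show ¬ (PySem.Int.floordiv n 1000 ≠ 0) by omega, if_false,
          List.nil_append]
        rw [pv_list_split0, pv_tail n (by omega) hth]
      · -- thousands branch of A
        have hg11 : (1:Int) ≤ PySem.Int.floordiv n 1000 := by
          rw [PySem.Int.le_floordiv_iff_mul_le (by norm_num)]; omega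
        have hg199 : PySem.Int.floordiv n 1000 < 100 := by
          rw [PySem.Int.floordiv_lt_iff_lt_mul (by norm_num)]; omega
        have hg1ne : PySem.Int.floordiv n 1000 ≠ 0 := by omega
        have hw1 : pvWlook (PySem.Int.floordiv n 1000) =
            number_to_hindi_words (PySem.Int.floordiv n 1000) := pv_wget _ hg11 hg199
        have hones := fun h10 => pv_ones_digit (PySem.Int.floordiv n 1000) hg11 h10
        rw [if_pos hg1ne]
        simp only [List.nil_append]
        rw [pv_list_split]
        rw [number_to_hindi_words.eq_def]
        simp only [show ¬ n = 0 by omega, show ¬ n < 10 by omega, show ¬ n < 20 by omega,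
          show ¬ (21 ≤ n ∧ n ≤ 29) by omega, show ¬ n < 100 by omega, show ¬ n < 1000 by omega,
          hbig, if_false, if_true]
        by_cases hr1 : PySem.Int.mod n 1000 = 0
        · simp only [hr1, eq_self_iff_true, if_true]
          simp only [show ¬ ((PySem.Int.floordiv (0:Int) 100) ≠ 0) from by decide,
            show ¬ ((PySem.Int.mod (0:Int) 100) ≠ 0) from by decide, if_false, List.append_nil]
          rw [pv_join_one, hw1]
          by_cases h1' : PySem.Int.floordiv n 1000 = 1
          · simp only [h1', eq_self_iff_true, if_true]
            rw [pvA_one]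
            decide
          · by_cases h10 : PySem.Int.floordiv n 1000 < 10
            · simp only [h1', if_false, h10, if_true]
              rw [hones h10, show (" हज़ार" : String) = " " ++ "हज़ार" from by decide]
              simp only [String.append_assoc]
            · simp only [h1', h10, if_false]
              rw [show (" हज़ार" : String) = " " ++ "हज़ार" from by decide]
              simp only [String.append_assoc]
        · simp only [hr1, if_false]
          have htail := pv_tail (PySem.Int.mod n 1000) (by omega) (by omega)
          have hne : ((if PySem.Int.floordiv (PySem.Int.mod n 1000) 100 ≠ 0 then
              [pvWlook (PySem.Int.floordiv (PySem.Int.mod n 1000) 100) ++ " " ++ "सौ"] else []) ++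
              (if PySem.Int.mod (PySem.Int.mod n 1000) 100 ≠ 0 then
                [pvWlook (PySem.Int.mod (PySem.Int.mod n 1000) 100)] else [])) ≠ [] := by
            by_cases hg2 : PySem.Int.floordiv (PySem.Int.mod n 1000) 100 = 0
            · have hmm : PySem.Int.mod (PySem.Int.mod n 1000) 100 = PySem.Int.mod n 1000 :=
                pv_mod_self hg2
              rw [hmm, if_neg (show ¬ (PySem.Int.floordiv (PySem.Int.mod n 1000) 100 ≠ 0) by omega),
                if_pos hr1, List.nil_append]
              exact List.cons_ne_nil _ _
            · rw [if_pos hg2, List.singleton_append]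
              exact List.cons_ne_nil _ _
          rw [pv_join_cons _ _ hne, ← htail, hw1]
          by_cases h1' : PySem.Int.floordiv n 1000 = 1
          · simp only [h1', eq_self_iff_true, if_true]
            rw [pvA_one, show ("एक हज़ार " : String) = "एक" ++ " " ++ "हज़ार" ++ " " from by decide]
          · by_cases h10 : PySem.Int.floordiv n 1000 < 10
            · simp only [h1', if_false, h10, if_true]
              rw [hones h10, show (" हज़ार " : String) = " " ++ "हज़ार" ++ " " from by decide]
              simp only [String.append_assoc]
            · simp only [h1', h10, if_false]
              rw [show (" हज़ार " : String) = " " ++ "हज़ार" ++ " " from by decide]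
              simp only [String.append_assoc]
    · -- n ≥ 100000: both fall back to str(number)
      rw [number_to_hindi_words.eq_def]
      unfold number_to_hindi_words_alt
      simp [show ¬ n = 0 by omega, show ¬ n < 10 by omega, show ¬ n < 20 by omega,
        show ¬ (21 ≤ n ∧ n ≤ 29) by omega, show ¬ n < 100 by omega, show ¬ n < 1000 by omega,
        show ¬ n < 100000 by omega, show n < 0 ∨ 100000 ≤ n from Or.inr (by omega)]

-- ===== VERDICT (by name: the statements are the Claim_ definitions above) =====
theorem number_to_hindi_words_spec : Claim_unchanged_number_to_hindi_words := by
  intro n _ hpre hnd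
  unfold Pre_number_to_hindi_words at hpre
  unfold D_number_to_hindi_words at hnd
  exact pv_main n (by omega)

theorem number_to_hindi_words_changed : Claim_changed_number_to_hindi_words := by
  unfold Claim_changed_number_to_hindi_words
  refine ⟨by decide, by decide, by decide, ?_, by decide, by decide⟩
  rw [number_to_hindi_words.eq_def]
  decide

theorem number_to_hindi_words_tight : Claim_exact_number_to_hindi_words := by
  intro n _ _ hd
  unfold D_number_to_hindi_words at hd
  obtain ⟨ha, hb⟩ := hd
  interval_cases n <;>
    (rw [number_to_hindi_words.eq_def]; unfold number_to_hindi_words_alt; decide)
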